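-- pv_equiv track=rewrite | github.com/Noah-Liknaw/Data-structures-and-algorithm- | 3160-find-the-number-of-distinct-colors-among-the-balls/3160-find-the-number-of-distinct-colors-among-the-balls.py | queryResults
-- ===== SOURCE A (Python) =====
-- from typing import List
--
-- def queryResults(limit: int, queries: List[List[int]]) -> List[int]:
--     ball_color = {}
--     color_count = {}
--     result = []
--
--     for x, y in queries:
--         if x in ball_color:
--             old_color = ball_color[x]
--             color_count[old_color] -= 1
--             if color_count[old_color] == 0:
--                 del color_count[old_color]
--
--         ball_color[x] = y
--         color_count[y] = color_count.get(y, 0) + 1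
--
--         result.append(len(color_count))
--
--     return result
-- ===== SOURCE B (Python) =====
-- from typing import List
--
-- def queryResults(limit: int, queries: List[List[int]]) -> List[int]:
--     ball_color = {}
--     result = []
--     for x, y in queries:
--         ball_color[x] = y
--         result.append(len(set(ball_color.values())))
--     return result
-- ===== Notes on version B (the rewrite author's own statement) =====
-- stated objective: simpler
-- what changed: Drops the incrementally maintained color_count table entirely; B keeps only the ball->color map and recomputes the number of distinct colors each step as len(set(ball_color.values())).
import Mathlib
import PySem

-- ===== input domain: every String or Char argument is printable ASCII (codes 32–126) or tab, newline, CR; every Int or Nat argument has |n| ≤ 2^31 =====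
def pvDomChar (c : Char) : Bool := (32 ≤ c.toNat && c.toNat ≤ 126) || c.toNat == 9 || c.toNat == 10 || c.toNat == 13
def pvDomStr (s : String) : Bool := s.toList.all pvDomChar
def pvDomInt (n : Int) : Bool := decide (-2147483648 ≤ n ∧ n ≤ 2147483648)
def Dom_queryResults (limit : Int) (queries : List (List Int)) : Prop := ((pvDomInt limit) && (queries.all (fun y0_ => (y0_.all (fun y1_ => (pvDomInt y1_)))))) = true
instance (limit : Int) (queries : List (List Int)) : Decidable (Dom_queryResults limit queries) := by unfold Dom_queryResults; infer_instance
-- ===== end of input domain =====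

-- B drops A's incrementally maintained color-count table and recomputes the number of
-- distinct colors each step as len(set(ball_color.values())) (objective: simpler).

-- ===== PORT A =====
-- One loop iteration of A: decrement (and possibly delete) the old color's count,
-- record the new color, append the table size.  The Python indexings
-- color_count[old_color] are ported as getD 0: the key is always present there
-- (old_color is a current value of ball_color), so the default is never used.
def qrStepA (st : PySem.Dict Int Int × PySem.Dict Int Int × List Int) (q : List Int) :
    PySem.Dict Int Int × PySem.Dict Int Int × List Int :=
  match q with
  | [x, y] =>
    let bc := st.1
    let cc := st.2.1
    let res := st.2.2
    let cc1 :=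
      if bc.contains x then
        let oldColor := bc.getD x 0
        let cc' := cc.insert oldColor (cc.getD oldColor 0 - 1)
        if cc'.getD oldColor 0 = 0 then cc'.erase oldColor else cc'
      else cc
    let bc' := bc.insert x y
    let cc2 := cc1.insert y (cc1.getD y 0 + 1)
    (bc', cc2, res ++ [(cc2.size : Int)])
  | _ => st  -- Python raises on a query that is not a pair; excluded by Pre_

def queryResults (_limit : Int) (queries : List (List Int)) : List Int :=
  (queries.foldl qrStepA (PySem.Dict.empty, PySem.Dict.empty, [])).2.2

-- ===== PORT B =====
-- One loop iteration of B: record the new color, append the number of distinct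
-- current colors, recomputed from scratch as len(set(ball_color.values())).
def qrStepB (st : PySem.Dict Int Int × List Int) (q : List Int) :
    PySem.Dict Int Int × List Int :=
  match q with
  | [x, y] =>
    let bc := st.1.insert x y
    (bc, st.2 ++ [((PySem.Set.ofList bc.values).length : Int)])
  | _ => st  -- Python raises on a query that is not a pair; excluded by Pre_

def queryResults_alt (_limit : Int) (queries : List (List Int)) : List Int :=
  (queries.foldl qrStepB (PySem.Dict.empty, [])).2

-- ===== PRECONDITION & SPEC =====
-- Pre_ excludes queries that are not 2-element lists: on those the unpacking
-- 'for x, y in queries' raises ValueError in both A and B.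
def Pre_queryResults (limit : Int) (queries : List (List Int)) : Prop :=
  ∀ q ∈ queries, q.length = 2
instance (limit : Int) (queries : List (List Int)) : Decidable (Pre_queryResults limit queries) := by unfold Pre_queryResults; infer_instance

def pvWitness_queryResults : Int × List (List Int) := (4, [[1, 4], [2, 5], [1, 3], [3, 4]])

def Spec_queryResults (limit : Int) (queries : List (List Int)) (out : List Int) : Prop := out = queryResults_alt limit queries
instance (limit : Int) (queries : List (List Int)) (out : List Int) : Decidable (Spec_queryResults limit queries out) := by unfold Spec_queryResults; infer_instance

-- ===== CLAIM (what is proved, stated in full; the proofs are below) =====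
def Claim_equal_queryResults : Prop := ∀ (limit : Int) (queries : List (List Int)), Dom_queryResults limit queries → Pre_queryResults limit queries → Spec_queryResults limit queries (queryResults limit queries)

-- ===== LEMMAS AND PROOFS =====

-- The color-count update of one A iteration, as a function of the two dicts.
def ccStepA (bc cc : PySem.Dict Int Int) (x y : Int) : PySem.Dict Int Int :=
  let cc1 :=
    if bc.contains x then
      let oldColor := bc.getD x 0
      let cc' := cc.insert oldColor (cc.getD oldColor 0 - 1)
      if cc'.getD oldColor 0 = 0 then cc'.erase oldColor else cc'
    else cc
  cc1.insert y (cc1.getD y 0 + 1)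

-- Loop invariant tying A's color_count to B's ball_color.
def qrInv (bc cc : PySem.Dict Int Int) : Prop :=
  bc.keys.Nodup ∧ cc.keys.Nodup ∧
  (∀ c : Int, cc.getD c 0 = (bc.values.count c : Int)) ∧
  (∀ c : Int, c ∈ cc.keys ↔ 0 < bc.values.count c)

-- erase facts (PySem.Dict.erase is a filter on items)
theorem qr_keys_erase (d : PySem.Dict Int Int) (k : Int) :
    (d.erase k).keys = d.keys.filter (fun c => !(c == k)) := by
  simp only [PySem.Dict.erase, PySem.Dict.keys, List.filter_map]
  rfl

theorem qr_get?_erase_self (d : PySem.Dict Int Int) (k : Int) :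
    (d.erase k).get? k = none := by
  simp [PySem.Dict.erase, PySem.Dict.get?, List.find?_eq_none]

theorem qr_find?_filter_ne (l : List (Int × Int)) (k c : Int) (h : c ≠ k) :
    (l.filter (fun p => !(p.1 == k))).find? (fun p => p.1 == c)
      = l.find? (fun p => p.1 == c) := by
  induction l with
  | nil => rfl
  | cons a t ih =>
    by_cases hak : a.1 = k
    · have hkc : ¬ (k = c) := fun hh => h hh.symm
      simp [hak, hkc, ih]
    · by_cases hc : a.1 = c
      · simp [hc, h]
      · simp [hak, hc, ih]

theorem qr_get?_erase_of_ne (d : PySem.Dict Int Int) (k c : Int) (h : c ≠ k) :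
    (d.erase k).get? c = d.get? c := by
  simp only [PySem.Dict.erase, PySem.Dict.get?]
  rw [qr_find?_filter_ne _ _ _ h]

theorem qr_getD_erase (d : PySem.Dict Int Int) (k c : Int) :
    (d.erase k).getD c 0 = if c = k then 0 else d.getD c 0 := by
  by_cases h : c = k
  · simp [h, PySem.Dict.getD, qr_get?_erase_self]
  · simp [h, PySem.Dict.getD, qr_get?_erase_of_ne d k c h]

-- count of a color among the values, through the keys
theorem qr_count_values (d : PySem.Dict Int Int) (hnd : d.keys.Nodup) (c : Int) :
    d.values.count c = d.keys.countP (fun k => d.getD k 0 == c) := by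
  rw [PySem.Dict.values_eq_map_keys d hnd 0]
  simp [List.count, List.countP_map, Function.comp_def]

-- how one assignment x := y changes the multiset of current colors
theorem qr_count_values_insert (bc : PySem.Dict Int Int) (hbk : bc.keys.Nodup) (x y c : Int) :
    ((bc.insert x y).values.count c : Int) =
      (bc.values.count c : Int)
        - (if bc.contains x ∧ bc.getD x 0 = c then 1 else 0)
        + (if y = c then 1 else 0) := by
  have hbk' : (bc.insert x y).keys.Nodup := PySem.Dict.nodup_keys_insert bc x y hbk
  rw [qr_count_values _ hbk' c, qr_count_values _ hbk c]
  by_cases hx : bc.contains x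
  · have hxk : x ∈ bc.keys := (PySem.Dict.contains_iff_mem_keys bc x).1 hx
    rw [PySem.Dict.keys_insert_of_contains bc y hx]
    have hperm := List.perm_cons_erase hxk
    rw [List.Perm.countP_eq _ hperm, List.Perm.countP_eq _ hperm]
    have hne : ∀ k ∈ bc.keys.erase x, k ≠ x := by
      intro k hk
      exact ((List.Nodup.mem_erase_iff hbk).1 hk).1
    rw [List.countP_cons, List.countP_cons]
    rw [List.countP_congr (l := bc.keys.erase x)
        (p := fun k => (bc.insert x y).getD k 0 == c) (q := fun k => bc.getD k 0 == c)
        (by intro k hk; simp [PySem.Dict.getD_insert, hne k hk])]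
    have h1 : (bc.insert x y).getD x 0 = y := by simp
    simp only [h1, hx, true_and]
    by_cases hyc : y = c <;> by_cases hoc : bc.getD x 0 = c <;> simp [hyc, hoc]
  · have hxk : x ∉ bc.keys := fun h => hx ((PySem.Dict.contains_iff_mem_keys bc x).2 h)
    rw [PySem.Dict.keys_insert_of_not_contains bc y (by simpa using hx)]
    rw [List.countP_append]
    have hne : ∀ k ∈ bc.keys, k ≠ x := fun k hk h => hxk (h ▸ hk)
    rw [List.countP_congr (l := bc.keys)
        (p := fun k => (bc.insert x y).getD k 0 == c) (q := fun k => bc.getD k 0 == c)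
        (by intro k hk; simp [PySem.Dict.getD_insert, hne k hk])]
    have h1 : (bc.insert x y).getD x 0 = y := by simp
    simp only [List.countP_cons, List.countP_nil, h1, hx]
    by_cases hyc : y = c <;> simp [hyc]

-- the invariant survives one iteration
theorem qrInv_step (bc cc : PySem.Dict Int Int) (x y : Int) (h : qrInv bc cc) :
    qrInv (bc.insert x y) (ccStepA bc cc x y) := by
  obtain ⟨hbk, hck, hcnt, hmem⟩ := h
  have hmemZ : ∀ c : Int, c ∈ cc.keys ↔ 0 < (bc.values.count c : Int) := by
    intro c; rw [hmem c]; exact_mod_cast Iff.rfl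
  -- the decrement/delete phase of the update, packaged: its result e satisfies
  -- getD e c 0 = count c - (1 if x had color c else 0), and likewise for membership
  have key : ∃ e : PySem.Dict Int Int,
      ccStepA bc cc x y = e.insert y (e.getD y 0 + 1) ∧ e.keys.Nodup ∧
      (∀ c : Int, e.getD c 0 = (bc.values.count c : Int) - (if bc.contains x ∧ bc.getD x 0 = c then 1 else 0)) ∧
      (∀ c : Int, c ∈ e.keys ↔ 0 < (bc.values.count c : Int) - (if bc.contains x ∧ bc.getD x 0 = c then 1 else 0)) := by
    by_cases hx : bc.contains x
    · have hxk : x ∈ bc.keys := (PySem.Dict.contains_iff_mem_keys bc x).1 hx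
      have holdmem : bc.getD x 0 ∈ bc.values := by
        rw [PySem.Dict.values_eq_map_keys bc hbk 0]
        exact List.mem_map_of_mem hxk
      have holdpos : 0 < (bc.values.count (bc.getD x 0) : Int) := by
        exact_mod_cast List.count_pos_iff.2 holdmem
      have hg' : ∀ c : Int, (cc.insert (bc.getD x 0) (cc.getD (bc.getD x 0) 0 - 1)).getD c 0
          = (bc.values.count c : Int) - (if bc.getD x 0 = c then 1 else 0) := by
        intro c
        rw [PySem.Dict.getD_insert]
        by_cases hc : c = bc.getD x 0
        · simp [hc, hcnt]
        · rw [if_neg hc, hcnt c, if_neg (fun hh : bc.getD x 0 = c => hc hh.symm)]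
          simp
      have hk' : ∀ c : Int, c ∈ (cc.insert (bc.getD x 0) (cc.getD (bc.getD x 0) 0 - 1)).keys
          ↔ c = bc.getD x 0 ∨ c ∈ cc.keys :=
        fun c => PySem.Dict.mem_keys_insert cc (bc.getD x 0) c (cc.getD (bc.getD x 0) 0 - 1)
      have hnd' : (cc.insert (bc.getD x 0) (cc.getD (bc.getD x 0) 0 - 1)).keys.Nodup :=
        PySem.Dict.nodup_keys_insert cc _ _ hck
      by_cases hz : cc.getD (bc.getD x 0) 0 - 1 = 0
      · -- count dropped to 0: the entry is deleted
        have hone : (bc.values.count (bc.getD x 0) : Int) = 1 := by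
          rw [hcnt] at hz; omega
        refine ⟨(cc.insert (bc.getD x 0) (cc.getD (bc.getD x 0) 0 - 1)).erase (bc.getD x 0),
          by simp [ccStepA, hx, hz], ?_, ?_, ?_⟩
        · rw [qr_keys_erase]; exact List.Nodup.filter _ hnd'
        · intro c
          rw [qr_getD_erase]
          by_cases hc : c = bc.getD x 0
          · subst hc
            simp [hx, hone]
          · have hc' : ¬ (bc.getD x 0 = c) := fun hh => hc hh.symm
            simp [hc, hc', hg' c]
        · intro c
          rw [qr_keys_erase]
          by_cases hc : c = bc.getD x 0
          · subst hc
            simp [List.mem_filter, hx, hone]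
          · have hc' : ¬ (bc.getD x 0 = c) := fun hh => hc hh.symm
            rw [if_neg (fun hh : bc.contains x = true ∧ bc.getD x 0 = c => hc' hh.2)]
            simp [List.mem_filter, hk' c, hc, hmemZ c]
      · -- count stays positive: the entry is kept
        have hzv : (bc.values.count (bc.getD x 0) : Int) - 1 ≠ 0 := by
          rw [hcnt] at hz; omega
        refine ⟨cc.insert (bc.getD x 0) (cc.getD (bc.getD x 0) 0 - 1),
          by simp [ccStepA, hx, hz], hnd', ?_, ?_⟩
        · intro c
          rw [hg' c]
          simp [hx]
        · intro c
          rw [hk' c]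
          by_cases hc : c = bc.getD x 0
          · subst hc
            rw [if_pos (And.intro hx rfl)]
            constructor
            · intro _; omega
            · intro _; left; rfl
          · have hc' : ¬ (bc.getD x 0 = c) := fun hh => hc hh.symm
            rw [if_neg (fun hh : bc.contains x = true ∧ bc.getD x 0 = c => hc' hh.2)]
            simp [hc, hmemZ c]
    · -- x is a fresh ball: nothing is decremented
      refine ⟨cc, by simp [ccStepA, hx], hck, ?_, ?_⟩
      · intro c; simp [hx, hcnt c]
      · intro c; simp [hx, hmemZ c]
  obtain ⟨e, heq, hend, heg, hem⟩ := key
  rw [heq]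
  have hsub : ∀ c : Int,
      0 ≤ (bc.values.count c : Int) - (if bc.contains x ∧ bc.getD x 0 = c then 1 else 0) := by
    intro c
    by_cases hxc : bc.contains x ∧ bc.getD x 0 = c
    · have hxk : x ∈ bc.keys := (PySem.Dict.contains_iff_mem_keys bc x).1 hxc.1
      have hcv : c ∈ bc.values := by
        rw [PySem.Dict.values_eq_map_keys bc hbk 0, ← hxc.2]
        exact List.mem_map_of_mem hxk
      have hpos : 0 < (bc.values.count c : Int) := by exact_mod_cast List.count_pos_iff.2 hcv
      simp only [if_pos hxc]
      omega
    · simp [hxc]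
  refine ⟨PySem.Dict.nodup_keys_insert bc x y hbk,
    PySem.Dict.nodup_keys_insert e y _ hend, ?_, ?_⟩
  · intro c
    rw [PySem.Dict.getD_insert, qr_count_values_insert bc hbk x y c]
    by_cases hc : c = y
    · rw [if_pos hc, heg y, hc, if_pos rfl]
    · rw [if_neg hc, heg c, if_neg (fun hh : y = c => hc hh.symm)]
      omega
  · intro c
    rw [PySem.Dict.mem_keys_insert, ← Int.natCast_pos, qr_count_values_insert bc hbk x y c]
    by_cases hc : c = y
    · rw [if_pos (hc ▸ rfl : y = c)]
      have := hsub c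
      constructor
      · intro _; omega
      · intro _; left; exact hc
    · rw [if_neg (fun hh : y = c => hc hh.symm)]
      rw [hem c]
      constructor
      · rintro (hcy | hmm)
        · exact absurd hcy hc
        · omega
      · intro hh; right; omega

-- two nodup lists with the same members have the same length
theorem qr_size_eq (bc cc : PySem.Dict Int Int)
    (hck : cc.keys.Nodup) (hmem : ∀ c : Int, c ∈ cc.keys ↔ 0 < bc.values.count c) :
    (cc.size : Int) = ((PySem.Set.ofList bc.values).length : Int) := by
  have hperm : cc.keys.Perm (PySem.Set.ofList bc.values) := by
    rw [List.perm_ext_iff_of_nodup hck (PySem.Set.nodup_ofList _)]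
    intro a
    rw [hmem a, PySem.Set.mem_ofList]
    exact List.count_pos_iff
  have hlen : cc.keys.length = (PySem.Set.ofList bc.values).length := hperm.length_eq
  have hsz : cc.size = cc.keys.length := by
    simp [PySem.Dict.size, PySem.Dict.keys]
  rw [hsz, hlen]

-- the main loop correspondence
theorem qr_loop (qs : List (List Int)) (bc cc : PySem.Dict Int Int) (resA resB : List Int)
    (hq : ∀ q ∈ qs, q.length = 2) (hinv : qrInv bc cc) (hres : resA = resB) :
    (qs.foldl qrStepA (bc, cc, resA)).2.2 = (qs.foldl qrStepB (bc, resB)).2 := by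
  induction qs generalizing bc cc resA resB with
  | nil => simpa using hres
  | cons q t ih =>
    have hlen : q.length = 2 := hq q (List.mem_cons_self)
    match q, hlen with
    | [x, y], _ =>
      have hstepA : qrStepA (bc, cc, resA) [x, y]
          = (bc.insert x y, ccStepA bc cc x y, resA ++ [((ccStepA bc cc x y).size : Int)]) := rfl
      have hstepB : qrStepB (bc, resB) [x, y]
          = (bc.insert x y, resB ++ [((PySem.Set.ofList (bc.insert x y).values).length : Int)]) := rfl
      have hinv' := qrInv_step bc cc x y hinv
      have hsz := qr_size_eq (bc.insert x y) (ccStepA bc cc x y) hinv'.2.1 hinv'.2.2.2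
      rw [List.foldl_cons, List.foldl_cons, hstepA, hstepB]
      exact ih _ _ _ _ (fun p hp => hq p (List.mem_cons_of_mem _ hp)) hinv'
        (by rw [hres, hsz])

-- ===== VERDICT (by name: the statement is the Claim_ definition above) =====
theorem queryResults_spec : Claim_equal_queryResults := by
  intro limit queries _hdom hpre
  unfold Spec_queryResults queryResults queryResults_alt
  exact qr_loop queries PySem.Dict.empty PySem.Dict.empty [] [] hpre
    ⟨by simp [PySem.Dict.keys_empty], by simp [PySem.Dict.keys_empty],
     by intro c; simp [PySem.Dict.empty, PySem.Dict.getD, PySem.Dict.get?, PySem.Dict.values],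
     by intro c; simp [PySem.Dict.empty, PySem.Dict.keys, PySem.Dict.values]⟩ rfl
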